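-- pv_equiv track=rewrite | github.com/prauser/ue-review-bot | scripts/stage3_llm_reviewer.py | _extract_fenced_content
-- ===== SOURCE A (Python) =====
-- from typing import Any, Dict, List, Optional, Set, Tuple
--
-- def _extract_fenced_content(text: str) -> Optional[str]:
--     """Extract text inside the first markdown code fence, if present."""
--     if "```" not in text:
--         return None
--     lines = text.split("\n")
--     inside = False
--     content_lines: List[str] = []
--     for line in lines:
--         stripped = line.strip()
--         if not inside and stripped.startswith("```"):
--             inside = True
--             continue
--         if inside and stripped == "```":
--             break
--         if inside:
--             content_lines.append(line)
--     return "\n".join(content_lines).strip() if content_lines else None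
-- ===== SOURCE B (Python) =====
-- from typing import Optional
--
--
-- def _extract_fenced_content(text: str) -> Optional[str]:
--     """Extract text inside the first markdown code fence, if present."""
--     if "```" not in text:
--         return None
--     lines = text.split("\n")
--     fences = [(i, l) for i, l in enumerate(lines) if l.strip().startswith("```")]
--     if not fences:
--         return None
--     i = fences[0][0]
--     closes = [j for j, l in fences if j > i and l.strip() == "```"]
--     j = closes[0] if closes else len(lines)
--     body = lines[i + 1:j]
--     return "\n".join(body).strip() if body else None
-- ===== Notes on version B (the rewrite author's own statement) =====
-- stated objective: alternative
-- what changed: Replaces A's stateful inside-flag scan (continue/break/accumulator) with an index-based method: enumerate all fence lines once, take the first as the opener and the first strictly later exact closing-fence line as the closer, then slice the lines between the two indices.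
import Mathlib
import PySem

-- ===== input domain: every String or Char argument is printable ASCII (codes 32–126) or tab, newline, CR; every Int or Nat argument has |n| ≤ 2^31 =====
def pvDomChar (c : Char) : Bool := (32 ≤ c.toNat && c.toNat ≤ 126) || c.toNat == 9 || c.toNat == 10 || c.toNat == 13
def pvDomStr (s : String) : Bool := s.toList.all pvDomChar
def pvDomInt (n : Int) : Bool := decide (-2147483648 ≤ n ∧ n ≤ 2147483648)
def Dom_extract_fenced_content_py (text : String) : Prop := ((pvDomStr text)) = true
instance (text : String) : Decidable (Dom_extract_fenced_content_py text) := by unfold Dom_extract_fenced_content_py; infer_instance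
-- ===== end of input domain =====

-- B replaces A's stateful inside-flag scan by an index-based method: list the (index, line)
-- pairs of all fence lines once, take the first as opener, the first strict-later exact "```"
-- as closer, and slice the lines between them (alternative decomposition, same cost).

-- ===== PORT A =====
-- A's for-loop with `inside` flag, `continue`, `break` and an accumulator, as structural recursion.
def pvLoopA : List String → Bool → List String → List String
  | [], _, acc => acc
  | l :: ls, inside, acc =>
    let stripped := PySem.Str.strip l
    if !inside && PySem.Str.startswith stripped "```" then pvLoopA ls true acc
    else if inside && (stripped == "```") then acc
    else if inside then pvLoopA ls inside (acc ++ [l])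
    else pvLoopA ls inside acc

def extract_fenced_content_py (text : String) : Option String :=
  if !PySem.Str.isIn "```" text then none
  else
    if pvLoopA ((PySem.Str.split? text "\n").getD []) false [] = [] then none
    else some (PySem.Str.strip (PySem.Str.join "\n"
      (pvLoopA ((PySem.Str.split? text "\n").getD []) false [])))

-- ===== PORT B =====
-- enumerate(lines)
def pvEnum : Int → List String → List (Int × String)
  | _, [] => []
  | k, l :: ls => (k, l) :: pvEnum (k + 1) ls

def extract_fenced_content_py_alt (text : String) : Option String :=
  if !PySem.Str.isIn "```" text then none
  else
    let lines := (PySem.Str.split? text "\n").getD []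
    let fences := (pvEnum 0 lines).filter
        (fun p => PySem.Str.startswith (PySem.Str.strip p.2) "```")
    match fences with
    | [] => none
    | f :: _ =>
      let i := f.1
      let closes := (fences.filter
          (fun p => decide (i < p.1) && (PySem.Str.strip p.2 == "```"))).map Prod.fst
      let j := match closes with | [] => (lines.length : Int) | c :: _ => c
      let body := PySem.List.slice lines (some (i + 1)) (some j)
      if body = [] then none else some (PySem.Str.strip (PySem.Str.join "\n" body))

-- ===== PRECONDITION & SPEC =====
def Spec_extract_fenced_content_py (text : String) (out : Option String) : Prop := out = extract_fenced_content_py_alt text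
instance (text : String) (out : Option String) : Decidable (Spec_extract_fenced_content_py text out) := by unfold Spec_extract_fenced_content_py; infer_instance

-- ===== CLAIM (what is proved, stated in full; the proofs are below) =====
def Claim_equal_extract_fenced_content_py : Prop := ∀ (text : String), Dom_extract_fenced_content_py text → Spec_extract_fenced_content_py text (extract_fenced_content_py text)

-- ===== LEMMAS AND PROOFS =====

-- Once inside the fence, A's loop appends lines until the exact-"```" closer: a takeWhile.
theorem pvLoopA_inside (ls : List String) : ∀ acc : List String,
    pvLoopA ls true acc = acc ++ ls.takeWhile (fun l => PySem.Str.strip l != "```") := by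
  induction ls with
  | nil => intro acc; simp [pvLoopA]
  | cons l ls ih =>
    intro acc
    by_cases h : PySem.Str.strip l = "```"
    · simp [pvLoopA, h]
    · have hne : (PySem.Str.strip l != "```") = true := by simp [bne, h]
      simp [pvLoopA, h, hne, ih]

-- Before the fence, A's loop skips lines (a dropWhile); from the opening line on, takeWhile.
theorem pvLoopA_outside (ls : List String) :
    pvLoopA ls false [] =
      match ls.dropWhile (fun l => !(PySem.Str.startswith (PySem.Str.strip l) "```")) with
      | [] => []
      | _ :: tl => tl.takeWhile (fun l => PySem.Str.strip l != "```") := by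
  induction ls with
  | nil => simp [pvLoopA]
  | cons l ls ih =>
    rw [pvLoopA, List.dropWhile_cons]
    by_cases h : PySem.Chars.startswith (PySem.Chars.strip l.toList) ['`', '`', '`'] = true
    · simp [h, pvLoopA_inside]
    · simp only [Bool.not_eq_true] at h
      simp [h, ih]

theorem pvEnum_append (xs ys : List String) : ∀ (k : Int),
    pvEnum k (xs ++ ys) = pvEnum k xs ++ pvEnum (k + xs.length) ys := by
  induction xs with
  | nil => intro k; simp [pvEnum]
  | cons x xs ih =>
    intro k
    have hk : k + ((x :: xs).length : Int) = (k + 1) + (xs.length : Int) := by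
      simp only [List.length_cons]; push_cast; ring
    simp only [List.cons_append, pvEnum, ih (k + 1), hk]

theorem pvEnum_ge (xs : List String) : ∀ (k : Int) (p : Int × String),
    p ∈ pvEnum k xs → k ≤ p.1 := by
  induction xs with
  | nil => intro k p h; simp [pvEnum] at h
  | cons x xs ih =>
    intro k p h
    simp only [pvEnum, List.mem_cons] at h
    rcases h with h | h
    · simp [h]
    · have := ih (k + 1) p h; omega

theorem pvEnum_filter_nil (F : String → Bool) (xs : List String) : ∀ (k : Int),
    (∀ x ∈ xs, F x = false) → (pvEnum k xs).filter (fun p => F p.2) = [] := by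
  induction xs with
  | nil => intro k _; simp [pvEnum]
  | cons x xs ih =>
    intro k hall
    simp only [pvEnum, List.filter_cons]
    rw [if_neg (by simp [hall x (by simp)]), ih (k + 1) (fun y hy => hall y (by simp [hy]))]

theorem pv_dropWhile_head_false (p : String → Bool) : ∀ (l : List String) (hd : String) (tl : List String),
    l.dropWhile p = hd :: tl → p hd = false := by
  intro l
  induction l with
  | nil => intro hd tl h; simp at h
  | cons a as ih =>
    intro hd tl h
    rw [List.dropWhile_cons] at h
    by_cases hp : p a = true
    · rw [if_pos hp] at h; exact ih hd tl h
    · rw [if_neg hp] at h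
      cases h
      simpa using hp

theorem pv_takeWhile_append_eq (p : String → Bool) : ∀ (e : List String) (c : String) (cs : List String),
    (∀ x ∈ e, p x = true) → p c = false → (e ++ c :: cs).takeWhile p = e := by
  intro e
  induction e with
  | nil => intro c cs _ hc; simp [hc]
  | cons a as ih =>
    intro c cs hall hc
    simp only [List.cons_append, List.takeWhile_cons, hall a (by simp)]
    simp [ih c cs (fun y hy => hall y (by simp [hy])) hc]

-- A closing line (strip == "```") is in particular a fence line (strip startswith "```").
theorem pv_close_is_fence (l : String) (h : (PySem.Str.strip l == "```") = true) :
    PySem.Str.startswith (PySem.Str.strip l) "```" = true := by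
  rw [eq_of_beq h]; decide

-- The bridge: A's loop result, packaged as A's return, equals B's index-and-slice computation.
theorem pv_bridge (lines : List String) :
    (if pvLoopA lines false [] = [] then none
     else some (PySem.Str.strip (PySem.Str.join "\n" (pvLoopA lines false [])))) =
    (match (pvEnum 0 lines).filter
        (fun p => PySem.Str.startswith (PySem.Str.strip p.2) "```") with
     | [] => none
     | f :: _ =>
       let i := f.1
       let closes := (((pvEnum 0 lines).filter
            (fun p => PySem.Str.startswith (PySem.Str.strip p.2) "```")).filter
          (fun p => decide (i < p.1) && (PySem.Str.strip p.2 == "```"))).map Prod.fst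
       let j := match closes with | [] => (lines.length : Int) | c :: _ => c
       let body := PySem.List.slice lines (some (i + 1)) (some j)
       if body = [] then none else some (PySem.Str.strip (PySem.Str.join "\n" body))) := by
  rw [pvLoopA_outside]
  cases h : lines.dropWhile (fun l => !(PySem.Str.startswith (PySem.Str.strip l) "```")) with
  | nil =>
    have hall : ∀ x ∈ lines, PySem.Str.startswith (PySem.Str.strip x) "```" = false := by
      intro x hx
      have := List.dropWhile_eq_nil_iff.mp h x hx
      simpa using this
    rw [pvEnum_filter_nil _ _ 0 hall]
    simp
  | cons hd tl =>
    have hPhd : PySem.Str.startswith (PySem.Str.strip hd) "```" = true := by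
      have := pv_dropWhile_head_false _ lines hd tl h
      simpa using this
    obtain ⟨d, hdall, hdec⟩ :
        ∃ d, (∀ x ∈ d, PySem.Str.startswith (PySem.Str.strip x) "```" = false) ∧
          lines = d ++ hd :: tl := by
      refine ⟨lines.takeWhile (fun l => !(PySem.Str.startswith (PySem.Str.strip l) "```")),
        ?_, ?_⟩
      · intro x hx
        have := List.mem_takeWhile_imp hx
        simpa using this
      · conv_lhs => rw [← List.takeWhile_append_dropWhile
          (p := fun l => !(PySem.Str.startswith (PySem.Str.strip l) "```")) (l := lines)]
        rw [h]
    subst hdec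
    have hfences : (pvEnum 0 (d ++ hd :: tl)).filter
        (fun p => PySem.Str.startswith (PySem.Str.strip p.2) "```")
        = ((d.length : Int), hd) :: (pvEnum ((d.length : Int) + 1) tl).filter
            (fun p => PySem.Str.startswith (PySem.Str.strip p.2) "```") := by
      have hPhd2 : PySem.Chars.startswith (PySem.Chars.strip hd.toList) ['`', '`', '`'] = true := by
        simpa using hPhd
      rw [pvEnum_append, List.filter_append, pvEnum_filter_nil _ _ 0 hdall]
      simp [pvEnum, hPhd2]
    rw [hfences]
    simp only []
    have hclose : ((((d.length : Int), hd) :: (pvEnum ((d.length : Int) + 1) tl).filter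
          (fun p => PySem.Str.startswith (PySem.Str.strip p.2) "```")).filter
        (fun p => decide ((d.length : Int) < p.1) && (PySem.Str.strip p.2 == "```"))).map Prod.fst
        = ((pvEnum ((d.length : Int) + 1) tl).filter
            (fun p => PySem.Str.strip p.2 == "```")).map Prod.fst := by
      rw [List.filter_cons, if_neg (by simp)]
      rw [List.filter_filter]
      apply congrArg
      apply List.filter_congr
      intro p hp
      have hge := pvEnum_ge _ _ _ hp
      have hlt : decide ((d.length : Int) < p.1) = true := by
        simp only [decide_eq_true_eq]; omega
      by_cases hq : (PySem.Str.strip p.2 == "```") = true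
      · have hP : PySem.Chars.startswith (PySem.Chars.strip p.2.toList) ['`', '`', '`'] = true := by
          simpa using pv_close_is_fence _ hq
        simp [hq, hlt, hP]
      · simp [Bool.eq_false_iff.mpr hq]
    cases h2 : tl.dropWhile (fun l => PySem.Str.strip l != "```") with
    | nil =>
      have htall : ∀ x ∈ tl, (PySem.Str.strip x == "```") = false := by
        intro x hx
        have := List.dropWhile_eq_nil_iff.mp h2 x hx
        simpa [bne] using this
      have htake : tl.takeWhile (fun l => PySem.Str.strip l != "```") = tl := by
        have := List.takeWhile_append_dropWhile
          (p := fun l => PySem.Str.strip l != "```") (l := tl)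
        rw [h2] at this
        simpa using this
      rw [htake, hclose, pvEnum_filter_nil _ _ _ htall, List.map_nil]
      simp only []
      have hslice : PySem.List.slice (d ++ hd :: tl) (some ((d.length : Int) + 1))
          (some ((d ++ hd :: tl).length : Int)) = tl := by
        have h1 : ((d.length : Int) + 1) = ((d.length + 1 : Nat) : Int) := by push_cast; ring
        rw [h1, PySem.List.slice_natCast]
        have h3 : d ++ hd :: tl = (d ++ [hd]) ++ tl := by simp
        rw [h3]
        have h4 : (d ++ [hd]).length = d.length + 1 := by simp
        rw [← h4, List.drop_left]
        simp only [List.length_append, h4]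
        rw [List.take_of_length_le (by omega)]
      rw [hslice]
    | cons c cs =>
      have hQc : (PySem.Str.strip c == "```") = true := by
        have := pv_dropWhile_head_false _ tl c cs h2
        simpa [bne] using this
      obtain ⟨e, heall, hedec⟩ :
          ∃ e, (∀ x ∈ e, (PySem.Str.strip x == "```") = false) ∧ tl = e ++ c :: cs := by
        refine ⟨tl.takeWhile (fun l => PySem.Str.strip l != "```"), ?_, ?_⟩
        · intro x hx
          have := List.mem_takeWhile_imp hx
          simpa [bne] using this
        · conv_lhs => rw [← List.takeWhile_append_dropWhile
            (p := fun l => PySem.Str.strip l != "```") (l := tl)]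
          rw [h2]
      subst hedec
      have htake : (e ++ c :: cs).takeWhile (fun l => PySem.Str.strip l != "```") = e :=
        pv_takeWhile_append_eq _ e c cs
          (fun x hx => by simpa [bne] using heall x hx)
          (by simp [bne, hQc])
      have hclose2 : ((pvEnum ((d.length : Int) + 1) (e ++ c :: cs)).filter
          (fun p => PySem.Str.strip p.2 == "```")).map Prod.fst
          = ((d.length : Int) + 1 + (e.length : Int)) ::
            ((pvEnum ((d.length : Int) + 1 + (e.length : Int) + 1) cs).filter
              (fun p => PySem.Str.strip p.2 == "```")).map Prod.fst := by
        rw [pvEnum_append, List.filter_append, pvEnum_filter_nil _ _ _ heall]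
        simp [pvEnum, hQc]
      rw [htake, hclose, hclose2]
      simp only []
      have hslice : PySem.List.slice (d ++ hd :: (e ++ c :: cs)) (some ((d.length : Int) + 1))
          (some ((d.length : Int) + 1 + (e.length : Int))) = e := by
        have h1 : ((d.length : Int) + 1) = ((d.length + 1 : Nat) : Int) := by push_cast; ring
        have h2' : ((d.length : Int) + 1 + (e.length : Int))
            = ((d.length + 1 + e.length : Nat) : Int) := by push_cast; ring
        rw [h2', h1, PySem.List.slice_natCast]
        have h3 : d ++ hd :: (e ++ c :: cs) = (d ++ [hd]) ++ (e ++ c :: cs) := by simp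
        rw [h3]
        have h4 : (d ++ [hd]).length = d.length + 1 := by simp
        rw [← h4, List.drop_left]
        simp only [Nat.add_sub_cancel_left]
        exact List.take_left
      rw [hslice]

-- ===== VERDICT (by name: the statement is the Claim_ definition above) =====
theorem extract_fenced_content_py_spec : Claim_equal_extract_fenced_content_py := by
  intro text _
  unfold Spec_extract_fenced_content_py extract_fenced_content_py extract_fenced_content_py_alt
  by_cases hg : (!PySem.Str.isIn "```" text) = true
  · rw [if_pos hg, if_pos hg]
  · rw [if_neg hg, if_neg hg]
    exact pv_bridge _
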